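-- pv_equiv track=rewrite | github.com/mrzaizai2k/few_shot_routing_pipeline | src/multi_intent_benchmark_v2.py | _merge_short_fragments
-- ===== SOURCE A (Python) =====
-- def _merge_short_fragments(parts: list[str], cfg: dict) -> list[str]:
--     """
--     Post-processing step shared by method 3.
--     Any fragment shorter than cfg["min_words_merge"] words is appended
--     to the previous fragment instead of being kept separate.
--     """
--     if not parts:
--         return parts
--     result = [parts[0]]
--     for p in parts[1:]:
--         if len(p.split()) < cfg["min_words_merge"]:
--             result[-1] += " " + p
--         else:
--             result.append(p)
--     return result
-- ===== SOURCE B (Python) =====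
-- def _merge_short_fragments(parts: list[str], cfg: dict) -> list[str]:
--     # B: segment the list into maximal groups (a leader fragment followed by its
--     # run of short fragments) and join each group with spaces, instead of A's
--     # single pass that mutates result[-1].  With fewer than two fragments there
--     # is nothing to merge, so the cfg lookup is never needed.
--     if len(parts) < 2:
--         return parts
--     min_words = cfg["min_words_merge"]
--     groups = []
--     rest = parts
--     while rest:
--         k = 1
--         while k < len(rest) and len(rest[k].split()) < min_words:
--             k += 1
--         groups.append(" ".join(rest[:k]))
--         rest = rest[k:]
--     return groups
-- ===== Notes on version B (the rewrite author's own statement) =====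
-- stated objective: alternative
-- what changed: B segments the list into maximal groups (leader + following short fragments) with an inner scan and joins each slice with ' '.join, instead of A's single pass appending onto result[-1]; with fewer than two fragments it returns parts without touching cfg.
import Mathlib
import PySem

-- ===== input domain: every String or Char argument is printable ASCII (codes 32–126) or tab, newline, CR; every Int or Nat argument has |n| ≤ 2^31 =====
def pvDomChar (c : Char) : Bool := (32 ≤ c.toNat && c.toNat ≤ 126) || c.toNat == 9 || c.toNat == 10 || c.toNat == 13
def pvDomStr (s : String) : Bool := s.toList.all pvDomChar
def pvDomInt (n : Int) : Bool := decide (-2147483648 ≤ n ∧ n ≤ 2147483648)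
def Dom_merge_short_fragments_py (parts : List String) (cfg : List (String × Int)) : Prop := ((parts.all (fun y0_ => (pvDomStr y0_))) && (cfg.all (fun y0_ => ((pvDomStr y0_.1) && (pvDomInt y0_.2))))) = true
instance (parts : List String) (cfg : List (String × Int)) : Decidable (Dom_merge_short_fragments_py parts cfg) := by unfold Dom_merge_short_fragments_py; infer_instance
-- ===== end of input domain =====

-- B: alternative decomposition — segments the list into maximal groups (leader + its run of
-- short fragments) and joins each group, instead of A's single pass mutating result[-1].

-- fragment has fewer than m words (len(p.split()) < m)
def pvShort (m : Int) (p : String) : Bool := decide (((PySem.Str.split₀ p).length : Int) < m)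

-- ===== PORT A =====
-- one iteration of A's for-loop body over the state `result` (always nonempty)
def pvAStep (m : Int) (result : List String) (p : String) : List String :=
  if pvShort m p then
    result.dropLast ++ [(PySem.List.pyGetD result (-1) "") ++ " " ++ p]   -- result[-1] += " " + p
  else
    result ++ [p]

def merge_short_fragments_py (parts : List String) (cfg : List (String × Int)) : List String :=
  match parts with
  | [] => parts
  | p0 :: rest =>      -- result = [parts[0]]; loop over parts[1:]
      List.foldl (pvAStep (PySem.Dict.getD ⟨cfg⟩ "min_words_merge" 0)) [p0] rest

-- ===== PORT B =====
-- B's outer while-loop; the inner `while k < len(rest) and short(rest[k]): k += 1`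
-- computes k = 1 + length of the run of short fragments after the leader, so
-- rest[:k] = leader :: run and rest[k:] = (tail of rest).drop run.length.
def pvGroups (m : Int) : List String → List String
  | [] => []
  | p :: ps =>
      let run := ps.takeWhile (pvShort m)
      PySem.Str.join " " (p :: run) :: pvGroups m (ps.drop run.length)
  termination_by l => l.length
  decreasing_by simp

def merge_short_fragments_py_alt (parts : List String) (cfg : List (String × Int)) : List String :=
  match parts with
  | [] | [_] => parts    -- len(parts) < 2: nothing to merge, cfg never consulted
  | _ :: _ :: _ => pvGroups (PySem.Dict.getD ⟨cfg⟩ "min_words_merge" 0) parts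

-- ===== PRECONDITION & SPEC =====
-- Pre_ excludes exactly the inputs on which A raises KeyError: at least two fragments while
-- cfg lacks the key "min_words_merge" (with fewer than two fragments the loop body never
-- runs and A returns normally, so those stay inside Pre_).
def Pre_merge_short_fragments_py (parts : List String) (cfg : List (String × Int)) : Prop :=
  parts.length ≤ 1 ∨ (PySem.Dict.get? ⟨cfg⟩ "min_words_merge").isSome = true
instance (parts : List String) (cfg : List (String × Int)) : Decidable (Pre_merge_short_fragments_py parts cfg) := by unfold Pre_merge_short_fragments_py; infer_instance

def pvWitness_merge_short_fragments_py : List String × (List (String × Int)) :=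
  (["hello world", "a", "b c d"], [("min_words_merge", 2)])

def Spec_merge_short_fragments_py (parts : List String) (cfg : List (String × Int)) (out : List String) : Prop := out = merge_short_fragments_py_alt parts cfg
instance (parts : List String) (cfg : List (String × Int)) (out : List String) : Decidable (Spec_merge_short_fragments_py parts cfg out) := by unfold Spec_merge_short_fragments_py; infer_instance

-- ===== CLAIM (what is proved, stated in full; the proofs are below) =====
def Claim_equal_merge_short_fragments_py : Prop := ∀ (parts : List String) (cfg : List (String × Int)), Dom_merge_short_fragments_py parts cfg → Pre_merge_short_fragments_py parts cfg → Spec_merge_short_fragments_py parts cfg (merge_short_fragments_py parts cfg)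

-- ===== LEMMAS AND PROOFS =====

-- proof-only recursion equivalent to A's loop: state = (current last element, remaining input)
def pvGoA (m : Int) (last : String) : List String → List String
  | [] => [last]
  | p :: ps => if pvShort m p then pvGoA m (last ++ " " ++ p) ps else last :: pvGoA m p ps

theorem pvFoldA_eq_goA (m : Int) (ps : List String) :
    ∀ (init : List String) (last : String),
      List.foldl (pvAStep m) (init ++ [last]) ps = init ++ pvGoA m last ps := by
  induction ps with
  | nil => intro init last; simp [pvGoA]
  | cons p ps ih =>
      intro init last
      by_cases h : pvShort m p = true
      · simp only [List.foldl_cons, pvAStep, h, if_pos, List.dropLast_concat,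
          PySem.List.pyGetD_neg_one_append_singleton, pvGoA]
        exact ih init (last ++ " " ++ p)
      · simp only [List.foldl_cons, pvAStep, h, if_neg, pvGoA, Bool.not_eq_true] at *
        have := ih (init ++ [last]) p
        simpa [h, List.append_assoc] using this

theorem pvJoin_absorb (a b : String) (l : List String) :
    PySem.Str.join " " ((a ++ " " ++ b) :: l) = a ++ " " ++ PySem.Str.join " " (b :: l) := by
  apply String.toList_inj.mp
  cases l with
  | nil => simp [PySem.Str.toList_join, PySem.Chars.join_singleton]
  | cons c l =>
      simp [PySem.Str.toList_join, PySem.Chars.join_cons_cons]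

theorem pvJoin_cons (a b : String) (l : List String) :
    PySem.Str.join " " (a :: b :: l) = a ++ " " ++ PySem.Str.join " " (b :: l) := by
  apply String.toList_inj.mp
  simp [PySem.Str.toList_join, PySem.Chars.join_cons_cons]

theorem pvGoA_eq_groups (m : Int) (ps : List String) :
    ∀ (last : String), pvGoA m last ps = pvGroups m (last :: ps) := by
  induction ps with
  | nil =>
      intro last
      rw [pvGroups.eq_def]
      simp [pvGoA, pvGroups]
      apply String.toList_inj.mp
      simp [PySem.Str.toList_join, PySem.Chars.join_singleton]
  | cons p ps ih =>
      intro last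
      by_cases h : pvShort m p = true
      · rw [pvGroups.eq_def]
        simp only [pvGoA, h, if_pos, List.takeWhile_cons, List.length_cons]
        rw [ih (last ++ " " ++ p), pvGroups]
        simp only [List.drop_succ_cons]
        rw [pvJoin_absorb, pvJoin_cons]
      · rw [pvGroups.eq_def]
        simp only [pvGoA, h, if_neg, List.takeWhile_cons, Bool.not_eq_true] at *
        simp [ih p, List.drop_zero]
        apply String.toList_inj.mp
        simp [PySem.Str.toList_join, PySem.Chars.join_singleton]

-- ===== VERDICT (by name: the statement is the Claim_ definition above) =====
theorem merge_short_fragments_py_spec : Claim_equal_merge_short_fragments_py := by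
  intro parts cfg _ _
  unfold Spec_merge_short_fragments_py merge_short_fragments_py merge_short_fragments_py_alt
  match parts with
  | [] => rfl
  | [p0] => simp
  | p0 :: p1 :: rest =>
      simpa using
        (pvFoldA_eq_goA (PySem.Dict.getD ⟨cfg⟩ "min_words_merge" 0) (p1 :: rest) [] p0).trans
          (by simpa using pvGoA_eq_groups (PySem.Dict.getD ⟨cfg⟩ "min_words_merge" 0) (p1 :: rest) p0)
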